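-- pv_equiv track=rewrite | github.com/surferfelix/ATT_TM_Group_1 | code/utils.py | prev_next_tokens
-- ===== SOURCE A (Python) =====
-- def prev_next_tokens(tokens):
--
--     ### that would be my prev token:
--     #starting index
--     t_index = 0
--
--     previous_token = []
--     next_token = []
--
--     for i in range(len(tokens)):
--
--         # determine index for tokens
--         prev_index = i - 1
--         next_index = i + 1
--
--         # previous token if not 0 (than none) else append
--         if prev_index < 0:
--             prev_token = ""
--         else:
--             prev_token = tokens[prev_index]
--         previous_token.append(prev_token)
--
--         # next token one up
--         if next_index < len(tokens): # does that make sense? doesn't look a lot cleaner though ;)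
--             nex_token = tokens[next_index]
--         else:
--             nex_token = ""
--         next_token.append(nex_token)
--
--         # count up index to next
--         t_index += 1
--
--     return previous_token, next_token
-- ===== SOURCE B (Python) =====
-- def prev_next_tokens(tokens):
--     toks = list(tokens)
--     if not toks:
--         return [], []
--     return [""] + toks[:-1], toks[1:] + [""]
-- ===== Notes on version B (the rewrite author's own statement) =====
-- stated objective: simpler
-- what changed: Replaces the index loop with per-position boundary checks by two sentinel-padded shifted copies built from slices, with an up-front empty guard.
import Mathlib
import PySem

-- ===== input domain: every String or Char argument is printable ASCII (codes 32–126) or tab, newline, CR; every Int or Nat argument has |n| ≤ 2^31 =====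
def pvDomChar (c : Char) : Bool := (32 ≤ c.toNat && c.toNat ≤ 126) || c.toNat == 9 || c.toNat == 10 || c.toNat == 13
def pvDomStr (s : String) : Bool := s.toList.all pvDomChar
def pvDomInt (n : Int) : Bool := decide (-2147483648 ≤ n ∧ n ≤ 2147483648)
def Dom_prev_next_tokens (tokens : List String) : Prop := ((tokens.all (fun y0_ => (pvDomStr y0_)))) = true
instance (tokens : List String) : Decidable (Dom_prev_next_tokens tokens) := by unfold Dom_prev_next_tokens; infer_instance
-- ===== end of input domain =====

-- B replaces A's index loop with two sentinel-padded shifted slices (objective: simpler).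

-- ===== PORT A =====
def prev_next_tokens (tokens : List String) : List String × List String :=
  (PySem.List.pyRange 0 tokens.length 1).foldl
    (fun acc i =>
      let prev_index := i - 1
      let next_index := i + 1
      let prev_token : String :=
        if prev_index < 0 then "" else (PySem.List.pyGet? tokens prev_index).getD ""
      let nex_token : String :=
        if next_index < (tokens.length : Int) then (PySem.List.pyGet? tokens next_index).getD "" else ""
      (acc.1 ++ [prev_token], acc.2 ++ [nex_token]))
    ([], [])

-- ===== PORT B =====
def prev_next_tokens_alt (tokens : List String) : List String × List String :=
  if tokens = [] then ([], [])
  else ("" :: PySem.List.slice tokens none (some (-1)),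
        PySem.List.slice tokens (some 1) none ++ [""])

-- ===== PRECONDITION & SPEC =====
def Spec_prev_next_tokens (tokens : List String) (out : List String × List String) : Prop := out = prev_next_tokens_alt tokens
instance (tokens : List String) (out : List String × List String) : Decidable (Spec_prev_next_tokens tokens out) := by unfold Spec_prev_next_tokens; infer_instance

-- ===== CLAIM (what is proved, stated in full; the proofs are below) =====
def Claim_equal_prev_next_tokens : Prop := ∀ (tokens : List String), Dom_prev_next_tokens tokens → Spec_prev_next_tokens tokens (prev_next_tokens tokens)

-- ===== LEMMAS AND PROOFS =====

theorem prevMap_eq (tokens : List String) (h : tokens ≠ []) :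
    (PySem.List.pyRange 0 tokens.length 1).map
      (fun i => if i - 1 < 0 then "" else (PySem.List.pyGet? tokens (i - 1)).getD "")
      = "" :: tokens.dropLast := by
  rw [PySem.List.pyRange_one]
  apply List.ext_getElem
  · simp
    have : tokens.length ≠ 0 := by simpa using h
    omega
  · intro k h1 h2
    simp only [List.getElem_map, List.getElem_range]
    cases k with
    | zero => simp
    | succ k' =>
      have hk : k' < tokens.length - 1 := by
        simp at h1; omega
      have hcast : ((0 : Int) + ((k' + 1 : Nat) : Int)) - 1 = ((k' : Nat) : Int) := by
        push_cast; ring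
      rw [hcast]
      have hlt : ¬ (((k' : Nat) : Int) < 0) := by omega
      simp only [if_neg hlt, PySem.List.pyGet?_natCast]
      have hk' : k' < tokens.length := by omega
      simp [List.getElem?_eq_getElem hk', List.getElem_dropLast]

theorem nextMap_eq (tokens : List String)
    (h : tokens ≠ []) :
    (PySem.List.pyRange 0 tokens.length 1).map
      (fun i => if i + 1 < (tokens.length : Int) then (PySem.List.pyGet? tokens (i + 1)).getD "" else "")
      = tokens.drop 1 ++ [""] := by
  rw [PySem.List.pyRange_one]
  apply List.ext_getElem
  · cases tokens with
    | nil => exact absurd rfl h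
    | cons a as => simp
  · intro k h1 h2
    simp only [List.getElem_map, List.getElem_range]
    have hkn : k < tokens.length := by simpa using h1
    have hcast : ((0 : Int) + ((k : Nat) : Int)) + 1 = (((k + 1 : Nat) : Int)) := by
      push_cast; ring
    rw [hcast, PySem.List.pyGet?_natCast]
    by_cases hlast : k + 1 < tokens.length
    · have : (((k + 1 : Nat) : Int)) < (tokens.length : Int) := by exact_mod_cast hlast
      rw [if_pos this]
      have hk1 : k < tokens.length - 1 := by omega
      rw [List.getElem_append_left (by simpa using hk1)]
      simp [List.getElem?_eq_getElem hlast]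
    · have : ¬ ((((k + 1 : Nat) : Int)) < (tokens.length : Int)) := by
        intro hc; exact hlast (by exact_mod_cast hc)
      rw [if_neg this]
      have hk : k = tokens.length - 1 := by omega
      rw [List.getElem_append_right (by simp; omega)]
      simp

-- ===== VERDICT (by name: the statement is the Claim_ definition above) =====
theorem prev_next_tokens_spec : Claim_equal_prev_next_tokens := by
  intro tokens _
  unfold Spec_prev_next_tokens prev_next_tokens prev_next_tokens_alt
  rw [PySem.List.foldl_prod_mk
      (f := fun acc i => acc ++ [if i - 1 < 0 then "" else (PySem.List.pyGet? tokens (i - 1)).getD ""])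
      (g := fun acc i => acc ++ [if i + 1 < (tokens.length : Int) then (PySem.List.pyGet? tokens (i + 1)).getD "" else ""])]
  rw [PySem.List.foldl_append_singleton_eq_map, PySem.List.foldl_append_singleton_eq_map]
  by_cases h : tokens = []
  · subst h; simp [PySem.List.pyRange]
  · rw [if_neg h, PySem.List.slice_to_neg_one, PySem.List.slice_from_one]
    simp only [List.nil_append, prevMap_eq tokens h, nextMap_eq tokens h, List.drop_one]
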